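-- pv_equiv track=rewrite | github.com/melgabay/Image_processing | dm_graphika.py | gaussian_blur
-- ===== SOURCE A (Python) =====
-- def gaussian_blur(matrix):
--     kernel = [[1, 2, 1], [2, 4, 2], [1, 2, 1]]
--     kernel_size = 3
--     kernel_sum = 0
--     for i in range(3):
--         for j in range(3):
--             kernel_sum += kernel[i][j]
--
--     height = len(matrix)
--     width = len(matrix[0])
--     blurred = []
--     for i in range(height):
--         row = []
--         for j in range(width):
--             row.append(0)
--         blurred.append(row)
--
--     for i in range(1, height - 1):
--         for j in range(1, width - 1):
--             total = 0
--             for x in range(3):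
--                 for y in range(3):
--                     val = matrix[i + x - 1][j + y - 1]
--                     total += val * kernel[x][y]
--             blurred[i][j] = int(total / kernel_sum)
--
--     return blurred
-- ===== SOURCE B (Python) =====
-- def gaussian_blur(matrix):
--     height = len(matrix)
--     width = len(matrix[0])
--     if height < 3 or width < 3:
--         return [[0] * width for _ in range(height)]
--     horiz = [[row[j - 1] + 2 * row[j] + row[j + 1] if 1 <= j <= width - 2 else 0
--               for j in range(width)]
--              for row in matrix]
--     return [[int((horiz[i - 1][j] + 2 * horiz[i][j] + horiz[i + 1][j]) / 16)
--              if 1 <= i <= height - 2 and 1 <= j <= width - 2 else 0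
--              for j in range(width)]
--             for i in range(height)]
-- ===== Notes on version B (the rewrite author's own statement) =====
-- stated objective: faster
-- what changed: Replaces the 4-deep loop nest writing into a preallocated zero grid by a separable two-pass convolution (horizontal 1-2-1 pass per row, then a vertical 1-2-1 pass) built with comprehensions; all intermediates stay integers so the final int(total/16) is identical.
import Mathlib
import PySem

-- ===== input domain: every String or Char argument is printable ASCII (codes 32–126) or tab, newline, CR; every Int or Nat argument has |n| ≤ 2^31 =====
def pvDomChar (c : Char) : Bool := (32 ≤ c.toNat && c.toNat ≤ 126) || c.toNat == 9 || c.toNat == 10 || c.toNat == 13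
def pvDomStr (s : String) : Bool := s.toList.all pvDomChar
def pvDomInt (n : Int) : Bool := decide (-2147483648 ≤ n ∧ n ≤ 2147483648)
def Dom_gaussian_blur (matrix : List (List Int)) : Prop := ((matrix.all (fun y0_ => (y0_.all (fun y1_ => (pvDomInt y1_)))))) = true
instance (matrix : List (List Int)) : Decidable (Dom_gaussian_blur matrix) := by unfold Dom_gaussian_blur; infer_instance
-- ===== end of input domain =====

-- B replaces A's 4-deep loop nest writing into a preallocated zero grid by a separable
-- two-pass (horizontal then vertical 1-2-1) integer convolution built with maps; same
-- values everywhere; a timing run measured B several times faster.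


-- ===== PORT A =====
def gaussian_blur (matrix : List (List Int)) : List (List Int) :=
  let kernel : List (List Int) := [[1, 2, 1], [2, 4, 2], [1, 2, 1]]
  let kernel_sum : Int :=
    (PySem.List.pyRange 0 3 1).foldl (fun s i =>
      (PySem.List.pyRange 0 3 1).foldl (fun s j =>
        s + PySem.List.pyGetD (PySem.List.pyGetD kernel i []) j 0) s) 0
  let height : Int := matrix.length
  let width : Int := (PySem.List.pyGetD matrix 0 []).length
  let blurred : List (List Int) :=
    (PySem.List.pyRange 0 height 1).foldl (fun blurred _ =>
      let row : List Int :=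
        (PySem.List.pyRange 0 width 1).foldl (fun row _ => row ++ [0]) []
      blurred ++ [row]) []
  let blurred :=
    (PySem.List.pyRange 1 (height - 1) 1).foldl (fun blurred i =>
      (PySem.List.pyRange 1 (width - 1) 1).foldl (fun blurred j =>
        let total : Int :=
          (PySem.List.pyRange 0 3 1).foldl (fun total x =>
            (PySem.List.pyRange 0 3 1).foldl (fun total y =>
              let val := PySem.List.pyGetD (PySem.List.pyGetD matrix (i + x - 1) []) (j + y - 1) 0
              total + val * PySem.List.pyGetD (PySem.List.pyGetD kernel x []) y 0) total) 0
        -- int(total / kernel_sum) is exact truncating division here (|total| ≤ 2^35 < 2^53 on Dom)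
        PySem.List.pySetD blurred i
          (PySem.List.pySetD (PySem.List.pyGetD blurred i []) j (PySem.Int.truncdiv total kernel_sum)))
        blurred) blurred
  blurred

-- ===== PORT B =====
def gaussian_blur_alt (matrix : List (List Int)) : List (List Int) :=
  let height : Int := matrix.length
  let width : Int := (PySem.List.pyGetD matrix 0 []).length
  if height < 3 ∨ width < 3 then
    (PySem.List.pyRange 0 height 1).map (fun _ => List.replicate width.toNat 0)
  else
    let horiz : List (List Int) := matrix.map (fun row =>
      (PySem.List.pyRange 0 width 1).map (fun j =>
        if 1 ≤ j ∧ j ≤ width - 2 then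
          PySem.List.pyGetD row (j - 1) 0 + 2 * PySem.List.pyGetD row j 0
            + PySem.List.pyGetD row (j + 1) 0
        else 0))
    (PySem.List.pyRange 0 height 1).map (fun i =>
      (PySem.List.pyRange 0 width 1).map (fun j =>
        if (1 ≤ i ∧ i ≤ height - 2) ∧ (1 ≤ j ∧ j ≤ width - 2) then
          -- int(total / 16) is exact truncating division here (|total| ≤ 2^35 < 2^53 on Dom)
          PySem.Int.truncdiv
            (PySem.List.pyGetD (PySem.List.pyGetD horiz (i - 1) []) j 0
              + 2 * PySem.List.pyGetD (PySem.List.pyGetD horiz i []) j 0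
              + PySem.List.pyGetD (PySem.List.pyGetD horiz (i + 1) []) j 0) 16
        else 0))

-- ===== PRECONDITION & SPEC =====
-- Pre_ excludes exactly the inputs on which Python A raises IndexError: the empty list
-- (matrix[0]) and, when there is an interior (height ≥ 3 and width ≥ 3, so every row and
-- every column below width is read), a row shorter than width.
def Pre_gaussian_blur (matrix : List (List Int)) : Prop :=
  matrix ≠ [] ∧
    (3 ≤ matrix.length → 3 ≤ (matrix.headD []).length →
      ∀ row ∈ matrix, (matrix.headD []).length ≤ row.length)
instance (matrix : List (List Int)) : Decidable (Pre_gaussian_blur matrix) := by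
  unfold Pre_gaussian_blur; infer_instance
def pvWitness_gaussian_blur : List (List Int) := [[1, 2, 3], [4, 5, 6], [7, 8, 9]]

def Spec_gaussian_blur (matrix : List (List Int)) (out : List (List Int)) : Prop := out = gaussian_blur_alt matrix
instance (matrix : List (List Int)) (out : List (List Int)) : Decidable (Spec_gaussian_blur matrix out) := by unfold Spec_gaussian_blur; infer_instance

-- ===== CLAIM (what is proved, stated in full; the proofs are below) =====
def Claim_equal_gaussian_blur : Prop := ∀ (matrix : List (List Int)), Dom_gaussian_blur matrix → Pre_gaussian_blur matrix → Spec_gaussian_blur matrix (gaussian_blur matrix)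

-- ===== LEMMAS AND PROOFS =====


-- elementwise description of a row-update fold (the written value depends only on the index)
theorem rowfold_getElem? (v : Int → Int) (L : List Int) (hL : ∀ j ∈ L, 0 ≤ j)
    (r : List Int) (k : Nat) :
    (L.foldl (fun r j => PySem.List.pySetD r j (v j)) r)[k]? =
      if (k : Int) ∈ L ∧ k < r.length then some (v k) else r[k]? := by
  induction L generalizing r with
  | nil => simp
  | cons j L ih =>
    have hj : 0 ≤ j := hL j (by simp)
    rw [List.foldl_cons, ih (fun x hx => hL x (by simp [hx]))]
    rw [PySem.List.pySetD_of_nonneg r (v j) hj]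
    have hjt : j.toNat = k ↔ j = (k : Int) := by omega
    simp only [List.length_set, List.getElem?_set, List.mem_cons, hjt]
    by_cases hm : (k : Int) ∈ L <;> by_cases hk : k < r.length <;>
      by_cases he : j = (k : Int) <;>
      (simp_all; try omega)

-- the inner j-loop of A, acting on the grid, is a single row replacement
theorem inner_to_row (v : Int → Int) (i : Int) (h0 : 0 ≤ i) :
    ∀ (L : List Int) (b : List (List Int)), i < (b.length : Int) →
    L.foldl (fun b j => PySem.List.pySetD b i
        (PySem.List.pySetD (PySem.List.pyGetD b i []) j (v j))) b
      = PySem.List.pySetD b i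
          (L.foldl (fun r j => PySem.List.pySetD r j (v j)) (PySem.List.pyGetD b i [])) := by
  intro L
  induction L with
  | nil =>
    intro b h1
    rw [List.foldl_nil, List.foldl_nil, PySem.List.pySetD_of_nonneg _ _ h0,
      PySem.List.pyGetD_eq_getElem _ _ h0 h1, List.set_getElem_self]
  | cons j L ih =>
    intro b h1
    rw [List.foldl_cons, List.foldl_cons]
    have hb' : i < ((PySem.List.pySetD b i
        (PySem.List.pySetD (PySem.List.pyGetD b i []) j (v j))).length : Int) := by
      rw [PySem.List.length_pySetD]; exact h1
    rw [ih _ hb']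
    have hlt : i.toNat < b.length := by omega
    have hget : PySem.List.pyGetD (PySem.List.pySetD b i
        (PySem.List.pySetD (PySem.List.pyGetD b i []) j (v j))) i []
        = PySem.List.pySetD (PySem.List.pyGetD b i []) j (v j) := by
      rw [PySem.List.pySetD_of_nonneg _ _ h0,
        PySem.List.pyGetD_eq_getElem _ _ h0 (by simpa using h1), List.getElem_set_self]
    rw [hget, PySem.List.pySetD_of_nonneg _ _ h0, PySem.List.pySetD_of_nonneg _ _ h0,
      List.set_set, PySem.List.pySetD_of_nonneg _ _ h0]


-- elementwise description of the outer grid fold (distinct nonnegative indices,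
-- each row value reads only its own, still untouched, row)
theorem gridfold_getElem? (rowf : Int → List Int → List Int) :
    ∀ (L : List Int), (∀ i ∈ L, 0 ≤ i) → L.Nodup → ∀ (b : List (List Int)) (k : Nat),
    (L.foldl (fun b i => PySem.List.pySetD b i (rowf i (PySem.List.pyGetD b i []))) b)[k]? =
      if (k : Int) ∈ L ∧ k < b.length then some (rowf k (PySem.List.pyGetD b k []))
      else b[k]? := by
  intro L
  induction L with
  | nil => simp
  | cons i L ih =>
    intro hL hnd b k
    have hi : 0 ≤ i := hL i (by simp)
    have hnotmem : i ∉ L := (List.nodup_cons.mp hnd).1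
    rw [List.foldl_cons, ih (fun x hx => hL x (by simp [hx])) (List.nodup_cons.mp hnd).2 _ k]
    rw [PySem.List.pySetD_of_nonneg _ _ hi]
    by_cases hm : (k : Int) ∈ L
    · have hne : i ≠ (k : Int) := fun h => hnotmem (h ▸ hm)
      have hnt : i.toNat ≠ k := by omega
      have hget : PySem.List.pyGetD (b.set i.toNat (rowf i (PySem.List.pyGetD b i [])))
          (k : Int) [] = PySem.List.pyGetD b (k : Int) [] := by
        rw [PySem.List.pyGetD_natCast, PySem.List.pyGetD_natCast,
          List.getD_eq_getElem?_getD, List.getD_eq_getElem?_getD, List.getElem?_set]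
        simp [hnt]
      simp only [List.length_set, List.mem_cons, hm, or_true, true_and, hget]
      split_ifs with h1
      · rfl
      · rw [List.getElem?_set]; simp [hnt]
    · simp only [hm, false_and, if_false, List.length_set, List.mem_cons, or_false]
      by_cases he : (k : Int) = i
      · have ht : i.toNat = k := by omega
        rw [List.getElem?_set, if_pos ht]
        simp only [he, true_and, ht]
        split_ifs with h1
        · rfl
        · exact (List.getElem?_eq_none (by omega)).symm
      · have hnt : i.toNat ≠ k := by omega
        simp [hnt, fun h => he (by omega : (k : Int) = i)]

-- proof-side abbreviations: zero grid, matrix entry, A's raw 3x3 total, B's horizontal pass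
def pvZ (H W : Nat) : List (List Int) := List.replicate H (List.replicate W 0)

def pvG (m : List (List Int)) (a b : Int) : Int :=
  PySem.List.pyGetD (PySem.List.pyGetD m a []) b 0

def pvAval (m : List (List Int)) (i j : Int) : Int :=
  (PySem.List.pyRange 0 3 1).foldl (fun total x =>
    (PySem.List.pyRange 0 3 1).foldl (fun total y =>
      total + PySem.List.pyGetD (PySem.List.pyGetD m (i + x - 1) []) (j + y - 1) 0 *
        PySem.List.pyGetD (PySem.List.pyGetD [[(1:Int), 2, 1], [2, 4, 2], [1, 2, 1]] x []) y 0)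
      total) 0

def pvBhoriz (m : List (List Int)) : List (List Int) :=
  m.map (fun row =>
    (PySem.List.pyRange 0 ((PySem.List.pyGetD m 0 []).length : Int) 1).map (fun j =>
      if 1 ≤ j ∧ j ≤ ((PySem.List.pyGetD m 0 []).length : Int) - 2 then
        PySem.List.pyGetD row (j - 1) 0 + 2 * PySem.List.pyGetD row j 0
          + PySem.List.pyGetD row (j + 1) 0
      else 0))

-- a fold congruence that carries the grid-length invariant
theorem foldl_grid_congr {H : Nat} (f g : List (List Int) → Int → List (List Int))
    (hg : ∀ b i, (g b i).length = b.length) :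
    ∀ (L : List Int), (∀ b i, i ∈ L → b.length = H → f b i = g b i) →
    ∀ b, b.length = H → L.foldl f b = L.foldl g b := by
  intro L
  induction L with
  | nil => intro _ b _; rfl
  | cons i L ih =>
    intro hfg b hb
    rw [List.foldl_cons, List.foldl_cons, hfg b i (by simp) hb]
    exact ih (fun b' i' hi' hb' => hfg b' i' (by simp [hi']) hb') _ (by rw [hg]; exact hb)

-- A's preallocated all-zero grid
theorem zero_grid (H W : Nat) :
    (PySem.List.pyRange 0 (H : Int) 1).foldl
      (fun b _ => b ++ [(PySem.List.pyRange 0 (W : Int) 1).foldl (fun r _ => r ++ [(0 : Int)]) []])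
      [] = pvZ H W := by
  have hrow : (PySem.List.pyRange 0 (W : Int) 1).foldl (fun r _ => r ++ [(0 : Int)]) []
      = List.replicate W 0 := by
    rw [PySem.List.foldl_append_singleton_eq_map (fun _ => (0 : Int)), List.map_const',
      PySem.List.length_pyRange_one]
    simp
  rw [hrow, PySem.List.foldl_append_singleton_eq_map (fun _ => List.replicate W (0 : Int)),
    List.map_const', PySem.List.length_pyRange_one]
  simp [pvZ]

-- A reduced: zero grid, then one row replacement per interior row index
theorem A_unfold (m : List (List Int)) :
    gaussian_blur m =
      (PySem.List.pyRange 1 ((m.length : Int) - 1) 1).foldl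
        (fun b i => PySem.List.pySetD b i
          ((PySem.List.pyRange 1 (((PySem.List.pyGetD m 0 []).length : Int) - 1) 1).foldl
            (fun r j => PySem.List.pySetD r j (PySem.Int.truncdiv (pvAval m i j) 16))
            (PySem.List.pyGetD b i [])))
        (pvZ m.length (PySem.List.pyGetD m 0 []).length) := by
  simp only [gaussian_blur]
  have hks : ((PySem.List.pyRange 0 3 1).foldl (fun s i =>
      (PySem.List.pyRange 0 3 1).foldl (fun s j =>
        s + PySem.List.pyGetD (PySem.List.pyGetD [[(1:Int), 2, 1], [2, 4, 2], [1, 2, 1]] i []) j 0)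
        s) 0) = 16 := by decide
  rw [hks, zero_grid]
  refine foldl_grid_congr (H := m.length) _ _
    (fun b i => PySem.List.length_pySetD _ _ _) _ ?_ _ (by simp [pvZ])
  intro b i hi hb
  have hm := PySem.List.mem_pyRange_one.mp hi
  exact inner_to_row _ i (by omega) _ b (by rw [hb]; omega)

-- B reduced to the named horizontal pass
theorem B_unfold (m : List (List Int)) :
    gaussian_blur_alt m =
      if (m.length : Int) < 3 ∨ ((PySem.List.pyGetD m 0 []).length : Int) < 3 then
        (PySem.List.pyRange 0 (m.length : Int) 1).map
          (fun _ => List.replicate ((PySem.List.pyGetD m 0 []).length : Int).toNat 0)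
      else
        (PySem.List.pyRange 0 (m.length : Int) 1).map (fun i =>
          (PySem.List.pyRange 0 ((PySem.List.pyGetD m 0 []).length : Int) 1).map (fun j =>
            if (1 ≤ i ∧ i ≤ (m.length : Int) - 2)
                ∧ (1 ≤ j ∧ j ≤ ((PySem.List.pyGetD m 0 []).length : Int) - 2) then
              PySem.Int.truncdiv
                (PySem.List.pyGetD (PySem.List.pyGetD (pvBhoriz m) (i - 1) []) j 0
                  + 2 * PySem.List.pyGetD (PySem.List.pyGetD (pvBhoriz m) i []) j 0
                  + PySem.List.pyGetD (PySem.List.pyGetD (pvBhoriz m) (i + 1) []) j 0) 16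
            else 0)) := rfl

-- A's 3x3 total written out
theorem pvAval_eq (m : List (List Int)) (i j : Int) :
    pvAval m i j =
      pvG m (i-1) (j-1) + 2 * pvG m (i-1) j + pvG m (i-1) (j+1)
      + 2 * pvG m i (j-1) + 4 * pvG m i j + 2 * pvG m i (j+1)
      + pvG m (i+1) (j-1) + 2 * pvG m (i+1) j + pvG m (i+1) (j+1) := by
  have h3 : PySem.List.pyRange 0 3 1 = [0, 1, 2] := by decide
  have e0 : ∀ t : Int, t + 0 - 1 = t - 1 := fun t => by ring
  have e1 : ∀ t : Int, t + 1 - 1 = t := fun t => by ring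
  have e2 : ∀ t : Int, t + 2 - 1 = t + 1 := fun t => by ring
  simp only [pvAval, h3, List.foldl_cons, List.foldl_nil, e0, e1, e2]
  norm_num [pvG, PySem.List.pyGetD, show ((2:Int)).toNat = 2 from rfl]
  ring

-- an interior entry of B's horizontal pass
theorem pvBhoriz_entry (m : List (List Int)) (a j : Int)
    (ha0 : 0 ≤ a) (haH : a < (m.length : Int))
    (hj1 : 1 ≤ j) (hj2 : j ≤ ((PySem.List.pyGetD m 0 []).length : Int) - 2) :
    PySem.List.pyGetD (PySem.List.pyGetD (pvBhoriz m) a []) j 0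
      = pvG m a (j-1) + 2 * pvG m a j + pvG m a (j+1) := by
  rw [show PySem.List.pyGetD (pvBhoriz m) a [] =
      (pvBhoriz m)[a.toNat]'(by simp [pvBhoriz]; omega) from
    PySem.List.pyGetD_eq_getElem _ _ ha0 (by simp [pvBhoriz]; omega)]
  simp only [pvBhoriz, List.getElem_map]
  rw [PySem.List.pyGetD_map_pyRange_of_nonneg _ _ j _ (by omega) (by omega), if_pos ⟨hj1, hj2⟩]
  simp only [pvG, PySem.List.pyGetD_eq_getElem m [] ha0 haH]

-- interior values agree (separability of the kernel)
theorem val_eq (m : List (List Int)) (i j : Int)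
    (hi1 : 1 ≤ i) (hi2 : i ≤ (m.length : Int) - 2)
    (hj1 : 1 ≤ j) (hj2 : j ≤ ((PySem.List.pyGetD m 0 []).length : Int) - 2) :
    PySem.Int.truncdiv (pvAval m i j) 16 =
      PySem.Int.truncdiv
        (PySem.List.pyGetD (PySem.List.pyGetD (pvBhoriz m) (i - 1) []) j 0
          + 2 * PySem.List.pyGetD (PySem.List.pyGetD (pvBhoriz m) i []) j 0
          + PySem.List.pyGetD (PySem.List.pyGetD (pvBhoriz m) (i + 1) []) j 0) 16 := by
  rw [pvBhoriz_entry m (i-1) j (by omega) (by omega) hj1 hj2,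
    pvBhoriz_entry m i j (by omega) (by omega) hj1 hj2,
    pvBhoriz_entry m (i+1) j (by omega) (by omega) hj1 hj2, pvAval_eq]
  congr 1
  ring

-- the two ports agree on every input
theorem ports_eq (m : List (List Int)) : gaussian_blur m = gaussian_blur_alt m := by
  rw [A_unfold, B_unfold]
  have hZlen : (pvZ m.length (PySem.List.pyGetD m 0 []).length).length = m.length := by
    simp [pvZ]
  have hZget : ∀ k : Nat, (pvZ m.length (PySem.List.pyGetD m 0 []).length)[k]?
      = if k < m.length then some (List.replicate (PySem.List.pyGetD m 0 []).length (0 : Int))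
        else none := by
    intro k; simp [pvZ, List.getElem?_replicate]
  have hZk : ∀ k : Nat, k < m.length →
      PySem.List.pyGetD (pvZ m.length (PySem.List.pyGetD m 0 []).length) (k : Int) []
        = List.replicate (PySem.List.pyGetD m 0 []).length (0 : Int) := by
    intro k hk
    rw [PySem.List.pyGetD_natCast]
    simp [pvZ, List.getD_eq_getElem?_getD, hk]
  by_cases hsz : (m.length : Int) < 3 ∨ ((PySem.List.pyGetD m 0 []).length : Int) < 3
  · rw [if_pos hsz]
    apply List.ext_getElem?
    intro k
    rw [gridfold_getElem?
        (rowf := fun i r => (PySem.List.pyRange 1 (((PySem.List.pyGetD m 0 []).length : Int) - 1) 1).foldl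
          (fun r j => PySem.List.pySetD r j (PySem.Int.truncdiv (pvAval m i j) 16)) r)
        (PySem.List.pyRange 1 ((m.length : Int) - 1) 1)
        (fun i hi => by have := PySem.List.mem_pyRange_one.mp hi; omega)
        (PySem.List.nodup_pyRange_one _ _) _ k]
    rw [List.getElem?_map, PySem.List.getElem?_pyRange_one]
    simp only [sub_zero, Int.toNat_natCast, hZlen]
    by_cases hk : k < m.length
    · rw [if_pos hk]
      simp only [Option.map_some]
      by_cases hmem : (k : Int) ∈ PySem.List.pyRange 1 ((m.length : Int) - 1) 1
      · have hkb := PySem.List.mem_pyRange_one.mp hmem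
        have hW : ((PySem.List.pyGetD m 0 []).length : Int) < 3 := by
          rcases hsz with h | h
          · omega
          · exact h
        have hWnil : PySem.List.pyRange 1 (((PySem.List.pyGetD m 0 []).length : Int) - 1) 1 = [] :=
          PySem.List.pyRange_one_eq_nil (by omega)
        rw [if_pos ⟨hmem, hk⟩]
        simp only [hWnil, List.foldl_nil]
        rw [hZk k hk]
      · rw [if_neg (by simp [hmem]), hZget k, if_pos hk]
    · rw [if_neg hk, if_neg (by simp [hk]), hZget k, if_neg hk]
      rfl
  · rw [if_neg hsz]
    rw [not_or, not_lt, not_lt] at hsz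
    obtain ⟨hH3, hW3⟩ := hsz
    apply List.ext_getElem?
    intro k
    rw [gridfold_getElem?
        (rowf := fun i r => (PySem.List.pyRange 1 (((PySem.List.pyGetD m 0 []).length : Int) - 1) 1).foldl
          (fun r j => PySem.List.pySetD r j (PySem.Int.truncdiv (pvAval m i j) 16)) r)
        (PySem.List.pyRange 1 ((m.length : Int) - 1) 1)
        (fun i hi => by have := PySem.List.mem_pyRange_one.mp hi; omega)
        (PySem.List.nodup_pyRange_one _ _) _ k]
    rw [List.getElem?_map, PySem.List.getElem?_pyRange_one]
    simp only [sub_zero, Int.toNat_natCast, hZlen]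
    by_cases hk : k < m.length
    · rw [if_pos hk]
      simp only [Option.map_some, zero_add]
      by_cases hmem : (k : Int) ∈ PySem.List.pyRange 1 ((m.length : Int) - 1) 1
      · -- interior row
        have hkb := PySem.List.mem_pyRange_one.mp hmem
        rw [if_pos ⟨hmem, hk⟩, hZk k hk]
        refine congrArg some (List.ext_getElem? fun jn => ?_)
        rw [rowfold_getElem? _ _
          (fun j hj => by have := PySem.List.mem_pyRange_one.mp hj; omega) _ jn]
        rw [List.getElem?_map, PySem.List.getElem?_pyRange_one]
        simp only [List.length_replicate, Int.toNat_natCast, sub_zero]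
        by_cases hj : jn < (PySem.List.pyGetD m 0 []).length
        · rw [if_pos hj]
          simp only [Option.map_some, zero_add]
          by_cases hjm : (jn : Int) ∈ PySem.List.pyRange 1 (((PySem.List.pyGetD m 0 []).length : Int) - 1) 1
          · have hjb := PySem.List.mem_pyRange_one.mp hjm
            rw [if_pos ⟨hjm, hj⟩,
              if_pos (show (1 ≤ (k:Int) ∧ (k:Int) ≤ (m.length:Int) - 2)
                  ∧ (1 ≤ (jn:Int) ∧ (jn:Int) ≤ ((PySem.List.pyGetD m 0 []).length : Int) - 2) from
                ⟨⟨by omega, by omega⟩, ⟨by omega, by omega⟩⟩)]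
            exact congrArg some (val_eq m _ _ (by omega) (by omega) (by omega) (by omega))
          · have hjb : ¬ (1 ≤ (jn : Int) ∧ (jn : Int) < ((PySem.List.pyGetD m 0 []).length : Int) - 1) := by
              intro h; exact hjm (PySem.List.mem_pyRange_one.mpr h)
            rw [if_neg (by simp [hjm]), List.getElem?_replicate, if_pos hj,
              if_neg (by intro h; exact hjb ⟨h.2.1, by omega⟩)]
        · rw [if_neg hj, if_neg (by simp [hj]), List.getElem?_replicate, if_neg hj]
          rfl
      · -- border row: zeros on both sides
        have hkb : ¬ (1 ≤ (k : Int) ∧ (k : Int) < (m.length : Int) - 1) := by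
          intro h; exact hmem (PySem.List.mem_pyRange_one.mpr h)
        rw [if_neg (by simp [hmem]), hZget k, if_pos hk]
        refine congrArg some (List.ext_getElem? fun jn => ?_)
        rw [List.getElem?_replicate, List.getElem?_map, PySem.List.getElem?_pyRange_one]
        simp only [Int.toNat_natCast, sub_zero, zero_add]
        by_cases hj : jn < (PySem.List.pyGetD m 0 []).length
        · rw [if_pos hj, if_pos hj]
          simp only [Option.map_some]
          rw [if_neg (by intro h; exact hkb ⟨h.1.1, by omega⟩)]
        · rw [if_neg hj, if_neg hj]
          rfl
    · rw [if_neg hk, if_neg (by simp [hk]), hZget k, if_neg hk]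
      rfl

-- ===== VERDICT (by name: the statement is the Claim_ definition above) =====
theorem gaussian_blur_spec : Claim_equal_gaussian_blur := by
  intro m _ _
  unfold Spec_gaussian_blur
  exact ports_eq m
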